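-- pv_equiv track=rewrite | github.com/mizorogi-aw/webui | app/main.py | assign_format_grid_node_ids
-- ===== SOURCE A (Python) =====
-- _FC_NODE_ID_START = 10001
--
-- def assign_format_grid_node_ids(rows: list[dict]) -> list[dict]:
--     """Assign NodeIds (NamespaceIndex=0, NodeIdNumber=N) to rows that have an empty NodeIdNumber."""
--     existing_ids: set[int] = set()
--     for row in rows:
--         id_num = str(row.get("NodeIdNumber", "")).strip()
--         if id_num and id_num.isdigit():
--             existing_ids.add(int(id_num))
--
--     next_id = _FC_NODE_ID_START
--     updated = []
--     for row in rows:
--         r = dict(row)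
--         if not str(r.get("NodeIdNumber", "")).strip():
--             while next_id in existing_ids:
--                 next_id += 1
--             r["NamespaceIndex"] = r.get("NamespaceIndex", "0") or "0"
--             r["NodeIdNumber"] = str(next_id)
--             existing_ids.add(next_id)
--             next_id += 1
--         updated.append(r)
--     return updated
-- ===== SOURCE B (Python) =====
-- _FC_NODE_ID_START = 10001
--
-- def assign_format_grid_node_ids(rows: list[dict]) -> list[dict]:
--     """Assign NodeIds (NamespaceIndex=0, NodeIdNumber=N) to rows that have an empty NodeIdNumber."""
--     existing_ids = {int(s) for row in rows
--                     if (s := str(row.get("NodeIdNumber", "")).strip()) and s.isdigit()}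
--
--     # how many rows need an id, then the first that many free ids, precomputed
--     missing = sum(1 for row in rows if not str(row.get("NodeIdNumber", "")).strip())
--     fresh: list[int] = []
--     n = _FC_NODE_ID_START
--     while len(fresh) < missing:
--         if n not in existing_ids:
--             fresh.append(n)
--         n += 1
--
--     it = iter(fresh)
--     out = []
--     for row in rows:
--         r = dict(row)
--         if not str(r.get("NodeIdNumber", "")).strip():
--             r["NamespaceIndex"] = r.get("NamespaceIndex", "0") or "0"
--             r["NodeIdNumber"] = str(next(it))
--         out.append(r)
--     return out
-- ===== Notes on version B (the rewrite author's own statement) =====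
-- stated objective: alternative
-- what changed: B replaces A's interleaved while-loop over a set mutated during assignment by a three-phase decomposition: count the rows missing a NodeIdNumber, precompute exactly that many free ids in one forward scan over the immutable existing-id set, then assign by consuming the precomputed list (correct because A's assigned ids are strictly increasing, so A's runtime set insertions are never observed).
import Mathlib
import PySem

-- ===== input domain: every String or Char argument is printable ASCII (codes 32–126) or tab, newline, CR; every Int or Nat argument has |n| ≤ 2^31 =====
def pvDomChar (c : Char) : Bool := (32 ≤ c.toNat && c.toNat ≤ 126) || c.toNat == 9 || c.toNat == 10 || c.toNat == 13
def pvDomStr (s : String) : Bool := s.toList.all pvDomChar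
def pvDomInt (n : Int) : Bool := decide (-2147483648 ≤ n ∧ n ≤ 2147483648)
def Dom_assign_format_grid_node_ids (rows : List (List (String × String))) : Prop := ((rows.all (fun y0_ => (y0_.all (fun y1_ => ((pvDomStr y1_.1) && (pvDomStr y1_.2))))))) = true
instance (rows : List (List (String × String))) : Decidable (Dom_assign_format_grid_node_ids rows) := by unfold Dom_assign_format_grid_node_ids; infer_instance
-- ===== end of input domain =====

-- B precomputes how many rows lack a NodeIdNumber and the list of that many free ids in one scan,
-- then assigns by consuming that list — instead of A's interleaved while-scan over a growing set
-- (objective: alternative decomposition, same cost; equivalence is about the return value).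

-- ===== PORT A =====

-- first pass: existing_ids = set of int(id_num) for stripped digit-only NodeIdNumber values
def pvExistingA (rows : List (List (String × String))) : PySem.Set Int :=
  rows.foldl (fun s row =>
    let idNum := PySem.Str.strip (PySem.Dict.getD (PySem.Dict.ofList row) "NodeIdNumber" "")
    if !(idNum == "") && PySem.Str.strIsdigit idNum then
      PySem.Set.add s ((PySem.Int.ofStr? idNum).getD 0)   -- ofStr? is some on a digit string; getD only totalizes
    else s) PySem.Set.empty

-- 'while next_id in existing_ids: next_id += 1'; fuel |existing_ids|+1 always suffices
def pvSkip (s : PySem.Set Int) : Nat → Int → Int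
  | 0, n => n
  | k+1, n => if PySem.Set.contains s n then pvSkip s k (n+1) else n

def assign_format_grid_node_ids (rows : List (List (String × String))) : List (List (String × String)) :=
  let st := rows.foldl (fun st row =>
    let r := PySem.Dict.ofList row
    if PySem.Str.strip (PySem.Dict.getD r "NodeIdNumber" "") == "" then
      let nid := pvSkip st.2.1 (st.2.1.length + 1) st.1
      let r := PySem.Dict.insert r "NamespaceIndex"
        (let v := PySem.Dict.getD r "NamespaceIndex" "0"; if v == "" then "0" else v)
      let r := PySem.Dict.insert r "NodeIdNumber" (PySem.Int.toStr nid)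
      (nid + 1, PySem.Set.add st.2.1 nid, st.2.2 ++ [r.items])
    else (st.1, st.2.1, st.2.2 ++ [r.items]))
    ((10001 : Int), pvExistingA rows, ([] : List (List (String × String))))
  st.2.2

-- ===== PORT B =====

def pvBlank (r : PySem.Dict String String) : Bool :=
  PySem.Str.strip (PySem.Dict.getD r "NodeIdNumber" "") == ""

-- {int(s) for row in rows if (s := ...NodeIdNumber...strip()) and s.isdigit()}
def pvKey (row : List (String × String)) : Option Int :=
  let idNum := PySem.Str.strip (PySem.Dict.getD (PySem.Dict.ofList row) "NodeIdNumber" "")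
  if !(idNum == "") && PySem.Str.strIsdigit idNum then
    some ((PySem.Int.ofStr? idNum).getD 0)
  else none

def pvExistingB (rows : List (List (String × String))) : PySem.Set Int :=
  PySem.Set.ofList (rows.filterMap pvKey)

-- 'while len(fresh) < missing: if n not in existing_ids: fresh.append(n); n += 1';
-- fuel missing + |existing_ids| always suffices
def pvFreshList (ex : PySem.Set Int) : Nat → Nat → Int → List Int
  | _, 0, _ => []
  | 0, _+1, _ => []
  | fuel+1, need+1, n =>
    if PySem.Set.contains ex n then pvFreshList ex fuel (need+1) (n+1)
    else n :: pvFreshList ex fuel need (n+1)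

def assign_format_grid_node_ids_alt (rows : List (List (String × String))) : List (List (String × String)) :=
  let ex := pvExistingB rows
  let missing := (rows.filter (fun row => pvBlank (PySem.Dict.ofList row))).length
  let fresh := pvFreshList ex (missing + ex.length) missing 10001
  let st := rows.foldl (fun st row =>
    let r := PySem.Dict.ofList row
    if pvBlank r then
      let r := PySem.Dict.insert r "NamespaceIndex"
        (let v := PySem.Dict.getD r "NamespaceIndex" "0"; if v == "" then "0" else v)
      let r := PySem.Dict.insert r "NodeIdNumber" (PySem.Int.toStr (st.1.headD 0))
      (st.1.tail, st.2 ++ [r.items])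
    else (st.1, st.2 ++ [r.items]))
    (fresh, ([] : List (List (String × String))))
  st.2

-- ===== PRECONDITION & SPEC =====
def Spec_assign_format_grid_node_ids (rows : List (List (String × String))) (out : List (List (String × String))) : Prop := out = assign_format_grid_node_ids_alt rows
instance (rows : List (List (String × String))) (out : List (List (String × String))) : Decidable (Spec_assign_format_grid_node_ids rows out) := by unfold Spec_assign_format_grid_node_ids; infer_instance

-- ===== CLAIM (what is proved, stated in full; the proofs are below) =====
def Claim_equal_assign_format_grid_node_ids : Prop := ∀ (rows : List (List (String × String))), Dom_assign_format_grid_node_ids rows → Spec_assign_format_grid_node_ids rows (assign_format_grid_node_ids rows)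

-- ===== LEMMAS AND PROOFS =====

-- the row produced for a blank NodeIdNumber, shared shape of both step functions
def pvNewRow (row : List (String × String)) (nid : Int) : List (String × String) :=
  (PySem.Dict.insert
    (PySem.Dict.insert (PySem.Dict.ofList row) "NamespaceIndex"
      (let v := PySem.Dict.getD (PySem.Dict.ofList row) "NamespaceIndex" "0"; if v == "" then "0" else v))
    "NodeIdNumber" (PySem.Int.toStr nid)).items

-- named (definitionally equal) forms of the two fold bodies
def pvStepA (st : Int × PySem.Set Int × List (List (String × String))) (row : List (String × String)) :
    Int × PySem.Set Int × List (List (String × String)) :=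
  let r := PySem.Dict.ofList row
  if pvBlank r then
    let nid := pvSkip st.2.1 (st.2.1.length + 1) st.1
    (nid + 1, PySem.Set.add st.2.1 nid, st.2.2 ++ [pvNewRow row nid])
  else (st.1, st.2.1, st.2.2 ++ [r.items])

def pvStepB (st : List Int × List (List (String × String))) (row : List (String × String)) :
    List Int × List (List (String × String)) :=
  let r := PySem.Dict.ofList row
  if pvBlank r then (st.1.tail, st.2 ++ [pvNewRow row (st.1.headD 0)])
  else (st.1, st.2 ++ [r.items])

def pvBlanks (rows : List (List (String × String))) : Nat :=
  (rows.filter (fun row => pvBlank (PySem.Dict.ofList row))).length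

-- number of elements of s that are ≥ n (the pigeonhole measure for the while-loops)
def pvCnt (s : PySem.Set Int) (n : Int) : Nat := (s.filter (fun x => decide (n ≤ x))).length

-- "f is the least free id ≥ n"
def pvLF (s : PySem.Set Int) (n f : Int) : Prop := n ≤ f ∧ f ∉ s ∧ ∀ m, n ≤ m → m < f → m ∈ s

theorem pvLF_unique {s : PySem.Set Int} {n f g : Int} (hf : pvLF s n f) (hg : pvLF s n g) : f = g := by
  obtain ⟨hf1, hf2, hf3⟩ := hf
  obtain ⟨hg1, hg2, hg3⟩ := hg
  by_contra hne
  rcases lt_or_gt_of_ne hne with h | h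
  · exact hf2 (hg3 f hf1 h)
  · exact hg2 (hf3 g hg1 h)

theorem pvContains_eq (s : PySem.Set Int) (n : Int) : PySem.Set.contains s n = true ↔ n ∈ s := by
  simp [PySem.Set.contains]

theorem pvFilterLenMono {p q : Int → Bool} (h : ∀ a, p a = true → q a = true) :
    ∀ l : List Int, (l.filter p).length ≤ (l.filter q).length := by
  intro l
  induction l with
  | nil => simp
  | cons a l ih =>
    by_cases hp : p a = true
    · rw [List.filter_cons_of_pos hp, List.filter_cons_of_pos (h a hp)]
      simpa using ih
    · rw [List.filter_cons_of_neg hp]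
      by_cases hq : q a = true
      · rw [List.filter_cons_of_pos hq]
        simp only [List.length_cons]
        omega
      · rw [List.filter_cons_of_neg hq]
        exact ih

theorem pvCnt_le_succ (s : PySem.Set Int) (n : Int) : pvCnt s (n+1) ≤ pvCnt s n :=
  pvFilterLenMono (fun a ha => by simp at ha ⊢; omega) s

theorem pvCnt_lt (s : PySem.Set Int) (n : Int) (hn : n ∈ s) : pvCnt s (n+1) < pvCnt s n := by
  revert hn
  induction s with
  | nil => intro hn; cases hn
  | cons a l ih =>
    intro hn
    simp only [pvCnt] at *
    by_cases hae : a = n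
    · subst hae
      rw [List.filter_cons_of_neg (by simp only [decide_eq_true_eq]; omega),
          List.filter_cons_of_pos (by simp only [decide_eq_true_eq]; omega)]
      have hmono := pvFilterLenMono
        (p := fun x => decide (a + 1 ≤ x)) (q := fun x => decide (a ≤ x))
        (fun x hx => by simp only [decide_eq_true_eq] at hx ⊢; omega) l
      simp only [List.length_cons]
      omega
    · have hnl : n ∈ l := by
        rcases List.mem_cons.mp hn with h | h
        · exact absurd h.symm hae
        · exact h
      by_cases hle : n ≤ a
      · have h1 : n + 1 ≤ a := by omega
        rw [List.filter_cons_of_pos (by simp only [decide_eq_true_eq]; omega),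
            List.filter_cons_of_pos (by simp only [decide_eq_true_eq]; omega)]
        simp only [List.length_cons]
        exact Nat.succ_lt_succ (ih hnl)
      · rw [List.filter_cons_of_neg (by simp only [decide_eq_true_eq]; omega),
            List.filter_cons_of_neg (by simp only [decide_eq_true_eq]; omega)]
        exact ih hnl

theorem pvSkip_lf : ∀ (fuel : Nat) (s : PySem.Set Int) (n : Int), pvCnt s n < fuel → pvLF s n (pvSkip s fuel n) := by
  intro fuel
  induction fuel with
  | zero => intro s n h; exact absurd h (Nat.not_lt_zero _)
  | succ k ih =>
    intro s n h
    simp only [pvSkip]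
    cases hc : PySem.Set.contains s n
    · simp only [Bool.false_eq_true, if_false]
      refine ⟨le_refl n, fun hm => ?_, fun m h1 h2 => absurd (lt_of_le_of_lt h1 h2) (lt_irrefl n)⟩
      have hct := (pvContains_eq s n).mpr hm
      rw [hc] at hct
      exact Bool.noConfusion hct
    · have hmem : n ∈ s := (pvContains_eq s n).mp hc
      have h2 : pvCnt s (n+1) < k := by have := pvCnt_lt s n hmem; omega
      obtain ⟨a1, a2, a3⟩ := ih s (n+1) h2
      rw [if_pos rfl]
      refine ⟨by omega, a2, fun m hm1 hm2 => ?_⟩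
      by_cases hmn : m = n
      · subst hmn; exact hmem
      · exact a3 m (by omega) hm2

-- a computable least free id ≥ n
def pvLfF (S : PySem.Set Int) (n : Int) : Int := pvSkip S (pvCnt S n + 1) n

theorem pvLfF_spec (S : PySem.Set Int) (n : Int) : pvLF S n (pvLfF S n) :=
  pvSkip_lf _ _ _ (Nat.lt_succ_self _)

theorem pvLfF_not_mem (S : PySem.Set Int) (n : Int) (h : n ∉ S) : pvLfF S n = n :=
  pvLF_unique (pvLfF_spec S n)
    ⟨le_refl n, h, fun m h1 h2 => absurd (lt_of_le_of_lt h1 h2) (lt_irrefl n)⟩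

theorem pvLfF_succ (S : PySem.Set Int) (n : Int) (h : n ∈ S) : pvLfF S n = pvLfF S (n+1) := by
  obtain ⟨b1, b2, b3⟩ := pvLfF_spec S n
  have hne : pvLfF S n ≠ n := fun he => b2 (by rw [he]; exact h)
  refine pvLF_unique ⟨by omega, b2, fun m2 hm1 hm2 => b3 m2 (by omega) hm2⟩ (pvLfF_spec S (n+1))

-- the canonical list of the k least free ids starting at n
def pvCanon (S : PySem.Set Int) : Nat → Int → List Int
  | 0, _ => []
  | k+1, n => pvLfF S n :: pvCanon S k (pvLfF S n + 1)

theorem pvCanon_succ_mem (S : PySem.Set Int) (k : Nat) (n : Int) (h : n ∈ S) :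
    pvCanon S k n = pvCanon S k (n+1) := by
  cases k with
  | zero => rfl
  | succ k => simp [pvCanon, pvLfF_succ S n h]

theorem pvFresh_eq_canon (S : PySem.Set Int) :
    ∀ (fuel k : Nat) (n : Int), k + pvCnt S n ≤ fuel → pvFreshList S fuel k n = pvCanon S k n := by
  intro fuel
  induction fuel with
  | zero =>
    intro k n h
    cases k with
    | zero => rfl
    | succ k => omega
  | succ fu ih =>
    intro k n h
    cases k with
    | zero => rfl
    | succ k' =>
      simp only [pvFreshList]
      cases hc : PySem.Set.contains S n
      · have hnm : n ∉ S := fun hm => by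
          have hct := (pvContains_eq S n).mpr hm
          rw [hc] at hct
          exact Bool.noConfusion hct
        simp only [Bool.false_eq_true, if_false]
        rw [ih k' (n+1) (by have := pvCnt_le_succ S n; omega)]
        simp [pvCanon, pvLfF_not_mem S n hnm]
      · have hm : n ∈ S := (pvContains_eq S n).mp hc
        rw [if_pos rfl]
        rw [ih (k'+1) (n+1) (by have := pvCnt_lt S n hm; omega)]
        exact (pvCanon_succ_mem S (k'+1) n hm).symm

theorem pvStepEx (s : PySem.Set Int) (row : List (String × String)) :
    (match pvKey row with | some v => PySem.Set.add s v | none => s)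
      = (fun (s : PySem.Set Int) row =>
          let idNum := PySem.Str.strip (PySem.Dict.getD (PySem.Dict.ofList row) "NodeIdNumber" "")
          if !(idNum == "") && PySem.Str.strIsdigit idNum then
            PySem.Set.add s ((PySem.Int.ofStr? idNum).getD 0)
          else s) s row := by
  simp only [pvKey]
  by_cases h : (!(PySem.Str.strip (PySem.Dict.getD (PySem.Dict.ofList row) "NodeIdNumber" "") == "")
      && PySem.Str.strIsdigit (PySem.Str.strip (PySem.Dict.getD (PySem.Dict.ofList row) "NodeIdNumber" ""))) = true
  · rw [if_pos h, if_pos h]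
  · rw [if_neg h, if_neg h]

theorem pvGen : ∀ (l : List (List (String × String))) (s : PySem.Set Int),
    (l.filterMap pvKey).foldl PySem.Set.add s
      = l.foldl (fun s row => match pvKey row with | some v => PySem.Set.add s v | none => s) s := by
  intro l
  induction l with
  | nil => intro s; rfl
  | cons row l ih =>
    intro s
    rw [List.filterMap_cons]
    cases hk : pvKey row <;> simp only [List.foldl_cons, hk] <;> exact ih _

theorem pvExisting_eq (rows : List (List (String × String))) : pvExistingB rows = pvExistingA rows := by
  have hof : pvExistingB rows = (rows.filterMap pvKey).foldl PySem.Set.add [] := rfl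
  rw [hof, pvGen rows []]
  rw [funext (fun s => funext (fun row => pvStepEx s row))]
  rfl

theorem pvMain (rest : List (List (String × String))) :
    ∀ (nextId : Int) (ex S : PySem.Set Int) (acc : List (List (String × String))),
      (∀ m, nextId ≤ m → (m ∈ ex ↔ m ∈ S)) →
      (rest.foldl pvStepA (nextId, ex, acc)).2.2
        = (rest.foldl pvStepB (pvCanon S (pvBlanks rest) nextId, acc)).2 := by
  induction rest with
  | nil => intro nextId ex S acc _; rfl
  | cons row rest ih =>
    intro nextId ex S acc h
    simp only [List.foldl_cons]
    by_cases hb : pvBlank (PySem.Dict.ofList row) = true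
    · have hblanks : pvBlanks (row :: rest) = pvBlanks rest + 1 := by
        simp [pvBlanks, hb]
      have hLFex : pvLF ex nextId (pvSkip ex (ex.length + 1) nextId) :=
        pvSkip_lf _ _ _ (by have := List.length_filter_le (fun x => decide (nextId ≤ x)) ex; simp only [pvCnt]; omega)
      have hLFS : pvLF S nextId (pvSkip ex (ex.length + 1) nextId) :=
        ⟨hLFex.1, fun hm => hLFex.2.1 ((h _ hLFex.1).mpr hm),
         fun m h1 h2 => (h m h1).mp (hLFex.2.2 m h1 h2)⟩
      have hf : pvSkip ex (ex.length + 1) nextId = pvLfF S nextId :=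
        pvLF_unique hLFS (pvLfF_spec S nextId)
      have hA : pvStepA (nextId, ex, acc) row
          = (pvLfF S nextId + 1, PySem.Set.add ex (pvLfF S nextId), acc ++ [pvNewRow row (pvLfF S nextId)]) := by
        simp only [pvStepA, hb, if_true]
        rw [hf]
      have hB : pvStepB (pvCanon S (pvBlanks rest + 1) nextId, acc) row
          = (pvCanon S (pvBlanks rest) (pvLfF S nextId + 1), acc ++ [pvNewRow row (pvLfF S nextId)]) := by
        simp [pvStepB, hb, pvCanon]
      rw [hblanks, hA, hB]
      have hnext : nextId ≤ pvLfF S nextId := hf ▸ hLFS.1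
      refine ih (pvLfF S nextId + 1) (PySem.Set.add ex (pvLfF S nextId)) S _ ?_
      intro m hm
      rw [PySem.Set.mem_add]
      constructor
      · rintro (hmx | hmf)
        · exact (h m (by omega)).mp hmx
        · omega
      · intro hmS
        exact Or.inl ((h m (by omega)).mpr hmS)
    · rw [Bool.not_eq_true] at hb
      have hblanks : pvBlanks (row :: rest) = pvBlanks rest := by
        simp [pvBlanks, hb]
      have hA : pvStepA (nextId, ex, acc) row = (nextId, ex, acc ++ [(PySem.Dict.ofList row).items]) := by
        simp [pvStepA, hb]
      have hB : pvStepB (pvCanon S (pvBlanks rest) nextId, acc) row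
          = (pvCanon S (pvBlanks rest) nextId, acc ++ [(PySem.Dict.ofList row).items]) := by
        simp [pvStepB, hb]
      rw [hblanks, hA, hB]
      exact ih nextId ex S _ h

-- ===== VERDICT (by name: the statement is the Claim_ definition above) =====
theorem assign_format_grid_node_ids_spec : Claim_equal_assign_format_grid_node_ids := by
  intro rows _
  show assign_format_grid_node_ids rows = assign_format_grid_node_ids_alt rows
  have hbridgeA : assign_format_grid_node_ids rows
      = (rows.foldl pvStepA ((10001 : Int), pvExistingA rows, ([] : List (List (String × String))))).2.2 := rfl
  have hbridgeB : assign_format_grid_node_ids_alt rows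
      = (rows.foldl pvStepB
          (pvFreshList (pvExistingB rows) (pvBlanks rows + (pvExistingB rows).length) (pvBlanks rows) 10001,
           ([] : List (List (String × String))))).2 := rfl
  rw [hbridgeA, hbridgeB, pvExisting_eq rows,
    pvFresh_eq_canon (pvExistingA rows) (pvBlanks rows + (pvExistingA rows).length) (pvBlanks rows) 10001
      (by have := List.length_filter_le (fun x => decide ((10001 : Int) ≤ x)) (pvExistingA rows); simp only [pvCnt]; omega)]
  exact pvMain rows 10001 (pvExistingA rows) (pvExistingA rows) [] (fun m _ => Iff.rfl)
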